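-- pv_equiv track=rewrite | github.com/ACodingChuan/DripSwap_Contract | tools/make-standard-json.py | expand_alias_sources
-- ===== SOURCE A (Python) =====
-- def expand_alias_sources(sources: dict[str, str], remaps: list[tuple[str, str]]) -> dict[str, str]:
--     expanded = dict(sources)
--     for alias, target in remaps:
--         for path, content in sources.items():
--             if path.startswith(target):
--                 candidate = alias + path[len(target) :]
--                 if candidate not in expanded:
--                     expanded[candidate] = content
--     return expanded
-- ===== SOURCE B (Python) =====
-- # Different algorithm: sort the source paths once; for each remap, binary-search
-- # the contiguous range of paths that start with its target, and emit the matches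
-- # back in original insertion order.  O((S+R) log S + matches) prefix work instead
-- # of A's O(R*S) scan.
-- def expand_alias_sources(sources: dict[str, str], remaps: list[tuple[str, str]]) -> dict[str, str]:
--     # entries sorted by path, each carrying its original position (paths are
--     # distinct dict keys, so the sort order is unambiguous)
--     entries = sorted(enumerate(sources.items()), key=lambda e: e[1][0])
--     paths = [e[1][0] for e in entries]
--
--     def bisect_left(x):  # first index with paths[idx] >= x (stdlib bisect, by hand)
--         lo, hi = 0, len(paths)
--         while lo < hi:
--             mid = (lo + hi) // 2
--             if paths[mid] < x:
--                 lo = mid + 1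
--             else:
--                 hi = mid
--         return lo
--
--     expanded = dict(sources)
--     for alias, target in remaps:
--         lo = bisect_left(target)
--         hi = bisect_left(target + "\U0010ffff")  # past every extension of target
--         # indices are distinct, so sorting the window restores original order
--         for _, (path, content) in sorted(entries[lo:hi]):
--             candidate = alias + path[len(target):]
--             if candidate not in expanded:
--                 expanded[candidate] = content
--     return expanded
-- ===== Notes on version B (the rewrite author's own statement) =====
-- stated objective: faster
-- what changed: A rescans every source path per remap; B sorts the paths once and binary-searches each remap's prefix range (prefix-matching paths form a contiguous run in sorted order), re-emitting matches in original insertion order, so the per-remap full scan disappears.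
import Mathlib
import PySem

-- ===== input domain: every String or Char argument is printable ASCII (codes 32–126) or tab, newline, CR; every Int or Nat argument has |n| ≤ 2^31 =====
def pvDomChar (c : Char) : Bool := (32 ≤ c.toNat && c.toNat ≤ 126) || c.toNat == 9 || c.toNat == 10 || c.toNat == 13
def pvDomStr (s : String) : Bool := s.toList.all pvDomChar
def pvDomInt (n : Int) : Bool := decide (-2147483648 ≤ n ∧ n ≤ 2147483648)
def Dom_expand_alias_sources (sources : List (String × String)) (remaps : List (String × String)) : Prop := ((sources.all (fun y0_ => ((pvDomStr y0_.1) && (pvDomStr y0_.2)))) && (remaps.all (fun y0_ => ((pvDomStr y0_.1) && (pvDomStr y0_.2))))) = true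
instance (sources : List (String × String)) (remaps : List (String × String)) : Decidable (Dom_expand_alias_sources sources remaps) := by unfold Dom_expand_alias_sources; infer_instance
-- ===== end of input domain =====

-- B sorts the source paths once and binary-searches each remap's prefix range instead of
-- A's full scan of the sources per remap (objective: faster on many remaps; exact same result).

-- ===== PORT A =====
def expand_alias_sources (sources : List (String × String)) (remaps : List (String × String)) : List (String × String) :=
  let src := PySem.Dict.ofList sources          -- expanded = dict(sources); sources.items() iterates the dict
  (remaps.foldl (fun (exp : PySem.Dict String String) at_ =>
      src.items.foldl (fun (exp : PySem.Dict String String) pc =>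
        if PySem.Str.startswith pc.1 at_.2 then
          let candidate := at_.1 ++ PySem.Str.slice pc.1 (some (PySem.Str.len at_.2)) none
          if exp.contains candidate then exp else exp.insert candidate pc.2
        else exp) exp) src).items

-- ===== PORT B =====
-- "\U0010ffff", the sentinel past every extension of a target (source paths are ASCII)
def pvM : Char := Char.ofNat 1114111

def expand_alias_sources_alt (sources : List (String × String)) (remaps : List (String × String)) : List (String × String) :=
  let src := PySem.Dict.ofList sources
  -- entries = sorted(enumerate(sources.items()), key=lambda e: e[1][0]); Python's str '<' is
  -- '<' on toList (PYSEM), so the sort key is the path's character list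
  let entries := PySem.List.sorted (PySem.List.enumerate src.items 0) (fun e => e.2.1.toList) false
  let paths := entries.map (fun e => e.2.1.toList)
  (remaps.foldl (fun (exp : PySem.Dict String String) at_ =>
      -- the hand-written bisect_left loop of Source B IS PySem.List.bisectLeft (PYSEM.md)
      let lo := PySem.List.bisectLeft paths at_.2.toList
      let hi := PySem.List.bisectLeft paths (at_.2.toList ++ [pvM])
      -- sorted(entries[lo:hi]): the enumerate indices are distinct, so the Python tuple
      -- sort is the sort by first component
      let window := PySem.List.sorted (PySem.List.slice entries (some (lo : Int)) (some (hi : Int))) (fun e => e.1) false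
      window.foldl (fun (exp : PySem.Dict String String) e =>
        let candidate := at_.1 ++ PySem.Str.slice e.2.1 (some (PySem.Str.len at_.2)) none
        if exp.contains candidate then exp else exp.insert candidate e.2.2) exp) src).items

-- ===== PRECONDITION & SPEC =====
def Spec_expand_alias_sources (sources : List (String × String)) (remaps : List (String × String)) (out : List (String × String)) : Prop := out = expand_alias_sources_alt sources remaps
instance (sources : List (String × String)) (remaps : List (String × String)) (out : List (String × String)) : Decidable (Spec_expand_alias_sources sources remaps out) := by unfold Spec_expand_alias_sources; infer_instance

-- ===== CLAIM (what is proved, stated in full; the proofs are below) =====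
def Claim_equal_expand_alias_sources : Prop := ∀ (sources : List (String × String)) (remaps : List (String × String)), Dom_expand_alias_sources sources remaps → Spec_expand_alias_sources sources remaps (expand_alias_sources sources remaps)

-- ===== LEMMAS AND PROOFS =====

-- invariant of the bisect_left loop on a sorted list
theorem pv_bisect_loop {α : Type} [LinearOrder α] (xs : List α) (x : α)
    (hs : xs.Pairwise (· ≤ ·)) :
    ∀ (fuel lo hi : Nat), lo ≤ hi → hi ≤ xs.length → hi - lo ≤ fuel →
    (∀ (j : Nat) (hj : j < xs.length), j < lo → xs[j] < x) →
    (∀ (j : Nat) (hj : j < xs.length), hi ≤ j → x ≤ xs[j]) →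
    PySem.List.bisectLeftLoop xs x fuel lo hi ≤ xs.length ∧
    (∀ (j : Nat) (hj : j < xs.length), j < PySem.List.bisectLeftLoop xs x fuel lo hi → xs[j] < x) ∧
    (∀ (j : Nat) (hj : j < xs.length), PySem.List.bisectLeftLoop xs x fuel lo hi ≤ j → x ≤ xs[j]) := by
  intro fuel
  induction fuel with
  | zero =>
    intro lo hi hlh hhl hfuel hlow hhigh
    have : lo = hi := by omega
    subst this
    simp only [PySem.List.bisectLeftLoop]
    exact ⟨by omega, hlow, hhigh⟩
  | succ fuel ih =>
    intro lo hi hlh hhl hfuel hlow hhigh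
    by_cases h : lo < hi
    · have hmidlt : (lo + hi) / 2 < xs.length := by omega
      have hget : xs[(lo + hi) / 2]? = some (xs[(lo + hi) / 2]'hmidlt) := List.getElem?_eq_getElem hmidlt
      simp only [PySem.List.bisectLeftLoop, if_pos h, hget]
      have hmono : ∀ (i j : Nat) (hi' : i < xs.length) (hj : j < xs.length), i ≤ j → xs[i] ≤ xs[j] := by
        intro i j hi' hj hij
        rcases Nat.lt_or_ge i j with h' | h'
        · exact (List.pairwise_iff_getElem.mp hs) i j hi' hj h'
        · have : i = j := by omega
          subst this; exact le_refl _
      by_cases hc : xs[(lo + hi) / 2]'hmidlt < x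
      · simp only [if_pos hc]
        exact ih ((lo + hi) / 2 + 1) hi (by omega) hhl (by omega)
          (fun j hj hjlt => lt_of_le_of_lt (hmono j ((lo + hi) / 2) hj hmidlt (by omega)) hc) hhigh
      · simp only [if_neg hc]
        exact ih lo ((lo + hi) / 2) (by omega) (by omega) (by omega) hlow
          (fun j hj hjge => le_trans (not_lt.mp hc) (hmono ((lo + hi) / 2) j hmidlt hj hjge))
    · have : lo = hi := by omega
      subst this
      simp only [PySem.List.bisectLeftLoop, if_neg h]
      exact ⟨by omega, hlow, hhigh⟩

-- bisect_left on a sorted list: everything strictly below the result is < x, the rest ≥ x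
theorem pv_bisect_spec {α : Type} [LinearOrder α] (xs : List α) (x : α)
    (hs : xs.Pairwise (· ≤ ·)) :
    PySem.List.bisectLeft xs x ≤ xs.length ∧
    (∀ (j : Nat) (hj : j < xs.length), j < PySem.List.bisectLeft xs x → xs[j] < x) ∧
    (∀ (j : Nat) (hj : j < xs.length), PySem.List.bisectLeft xs x ≤ j → x ≤ xs[j]) := by
  exact pv_bisect_loop xs x hs xs.length 0 xs.length (by omega) (le_refl _) (by omega)
    (fun j hj hc => by omega) (fun j hj hc => by omega)

-- cons ≤ cons for the lexicographic order on List Char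
theorem pv_cons_le_cons (a b : Char) (t p : List Char) :
    a :: t ≤ b :: p ↔ (a < b ∨ (a = b ∧ t ≤ p)) := by
  rw [← Std.not_lt, List.cons_lt_cons_iff]
  rw [show (t ≤ p) = ¬ (p < t) from by rw [← Std.not_lt]]
  rcases lt_trichotomy a b with h | h | h
  · simp [h, h.asymm, h.ne']
  · simp [h]
  · simp [h, h.asymm, h.ne', h.ne]

-- the strings with prefix t are exactly the interval [t, t ++ [pvM]) (chars below pvM)
theorem pv_prefix_range (t p : List Char) (hp : ∀ c ∈ p, c < pvM) :
    (t ≤ p ∧ p < t ++ [pvM]) ↔ t <+: p := by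
  induction t generalizing p with
  | nil =>
    simp only [List.nil_append, List.nil_prefix, iff_true]
    refine ⟨le_of_not_gt (List.not_lt_nil _), ?_⟩
    cases p with
    | nil => exact List.nil_lt_cons _ _
    | cons c p' => exact (List.cons_lt_cons_iff).mpr (Or.inl (hp c (by simp)))
  | cons a t ih =>
    cases p with
    | nil =>
      simp only [List.prefix_nil]
      constructor
      · rintro ⟨hle, -⟩
        exact absurd hle (not_le.mpr (List.nil_lt_cons _ _))
      · intro h; cases h
    | cons b p' =>
      rw [List.cons_append, List.cons_prefix_cons, pv_cons_le_cons, List.cons_lt_cons_iff]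
      have hp' : ∀ c ∈ p', c < pvM := fun c hc => hp c (by simp [hc])
      rcases lt_trichotomy a b with h | h | h
      · simp [h, h.asymm, h.ne, h.ne']
      · subst h
        simp [ih p' hp']
      · simp [h, h.asymm, h.ne, h.ne']

-- a predicate true exactly on an index window selects the contiguous segment
theorem pv_filter_eq_window {α : Type} (l : List α) (P : α → Bool) (lo hi : Nat)
    (hlh : lo ≤ hi) (hhl : hi ≤ l.length)
    (h : ∀ (j : Nat) (hj : j < l.length), P l[j] = true ↔ (lo ≤ j ∧ j < hi)) :
    l.filter P = (l.drop lo).take (hi - lo) := by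
  conv_lhs => rw [show l = l.take lo ++ ((l.drop lo).take (hi - lo) ++ l.drop hi) from by
    rw [show List.drop hi l = List.drop (hi - lo) (List.drop lo l) from by
          rw [List.drop_drop]; congr 1; omega,
        List.take_append_drop, List.take_append_drop]]
  rw [List.filter_append, List.filter_append]
  rw [List.filter_eq_nil_iff.mpr, List.filter_eq_self.mpr, List.filter_eq_nil_iff.mpr]
  · simp
  · intro a ha
    obtain ⟨i, hi', he⟩ := List.mem_iff_getElem.mp ha
    have hlen : (l.drop hi).length = l.length - hi := by simp
    have : l[hi + i]'(by omega) = a := by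
      rw [← he, List.getElem_drop]
    intro hPa
    have := (h (hi + i) (by omega)).mp (by rw [this]; exact hPa)
    omega
  · intro a ha
    obtain ⟨i, hi', he⟩ := List.mem_iff_getElem.mp ha
    have hlen : ((l.drop lo).take (hi - lo)).length = min (hi - lo) (l.length - lo) := by simp
    have : l[lo + i]'(by omega) = a := by
      rw [← he, List.getElem_take, List.getElem_drop]
    exact this ▸ (h (lo + i) (by omega)).mpr (by omega)
  · intro a ha
    obtain ⟨i, hi', he⟩ := List.mem_iff_getElem.mp ha
    have hlen : (l.take lo).length = min lo l.length := by simp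
    have : l[i]'(by omega) = a := by rw [← he, List.getElem_take]
    intro hPa
    have := (h i (by omega)).mp (by rw [this]; exact hPa)
    omega

-- filtering an enumeration by a predicate on the element and projecting back
theorem pv_enum_filter_map {α : Type} (xs : List α) (s : Int) (Q : α → Bool) :
    ((PySem.List.enumerate xs s).filter (fun e => Q e.2)).map (fun e => e.2) = xs.filter Q := by
  induction xs generalizing s with
  | nil => simp [PySem.List.enumerate]
  | cons a xs ih =>
    rw [PySem.List.enumerate_cons, List.filter_cons, List.filter_cons]
    by_cases hq : Q a = true
    · simp [hq, ih]
    · simp [hq, ih]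

-- a list is strictly below itself extended by one character
theorem pv_lt_snoc (t : List Char) (c : Char) : t < t ++ [c] := by
  induction t with
  | nil => exact List.nil_lt_cons _ _
  | cons a t ih => exact (List.cons_lt_cons_iff).mpr (Or.inr ⟨rfl, ih⟩)

-- every character of the stated domain is below the sentinel
theorem pv_char_lt (c : Char) (h : pvDomChar c = true) : c < pvM := by
  have hM : pvM.toNat = 1114111 := by decide
  have hc : c.toNat < pvM.toNat := by
    rw [hM]
    simp only [pvDomChar, Bool.or_eq_true, Bool.and_eq_true, decide_eq_true_eq, beq_iff_eq] at h
    omega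
  simp only [Char.lt_def, UInt32.lt_iff_toNat_lt]
  exact hc

-- every key of dict(sources) is a key occurring in sources
theorem pv_key_mem (l : List (String × String)) (pc : String × String)
    (h : pc ∈ (PySem.Dict.ofList l).items) : pc.1 ∈ l.map Prod.fst := by
  have h1 := PySem.Dict.mem_keys_of_mem_items _ h
  rw [show PySem.Dict.ofList l = List.foldl (fun acc p => acc.insert p.1 p.2) PySem.Dict.empty l from rfl] at h1
  rw [show (List.foldl (fun (acc : PySem.Dict String String) p => acc.insert p.1 p.2) PySem.Dict.empty l)
        = (List.foldl (fun (d : PySem.Dict String String) x => d.insert (Prod.fst x) ((fun _ x => x.2) d x)) PySem.Dict.empty l) from rfl,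
      PySem.Dict.keys_foldl_insert_key] at h1
  rcases (PySem.Set.mem_update _ _ _).mp h1 with h2 | h2
  · rw [PySem.Dict.keys_empty] at h2; cases h2
  · exact h2

-- the two DecidableLT instances on List Char agree, so the two bisectLeft spellings do
theorem pv_bisect_instLT (paths : List (List Char)) (x : List Char) :
    PySem.List.bisectLeft paths x
      = @PySem.List.bisectLeft (List Char) _ (@LinearOrder.toDecidableLT (List Char) _) paths x := by
  congr 1

-- likewise for the two DecidableLT spellings under sorted with a List Char key
theorem pv_sorted_instLT {α : Type} (xs : List α) (key : α → List Char) (rev : Bool) :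
    PySem.List.sorted xs key rev
      = @PySem.List.sorted α (List Char) _ (@LinearOrder.toDecidableLT (List Char) _) xs key rev := by
  congr 1

-- the sorted bisect window, re-sorted by original position, is exactly the
-- prefix-filtered enumeration of the items in original order
theorem pv_window (items : List (String × String)) (t : String)
    (hchars : ∀ pc ∈ items, ∀ c ∈ pc.1.toList, c < pvM)
    (entries : List (Int × (String × String)))
    (hent : entries = PySem.List.sorted (PySem.List.enumerate items 0) (fun e => e.2.1.toList) false)
    (paths : List (List Char)) (hpaths : paths = entries.map (fun e => e.2.1.toList))
    (lo hi : Nat) (hlo : lo = PySem.List.bisectLeft paths t.toList)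
    (hhi : hi = PySem.List.bisectLeft paths (t.toList ++ [pvM])) :
    PySem.List.sorted (PySem.List.slice entries (some (lo : Int)) (some (hi : Int))) (fun e => e.1) false
      = (PySem.List.enumerate items 0).filter (fun e => PySem.Str.startswith e.2.1 t) := by
  have hperm : entries.Perm (PySem.List.enumerate items 0) := by
    rw [hent]; exact PySem.List.sorted_perm _ _ _
  have hpw : paths.Pairwise (fun (a b : List Char) => a ≤ b) := by
    rw [hpaths, hent, pv_sorted_instLT]
    exact PySem.List.sorted_map_key_pairwise (PySem.List.enumerate items 0) (fun e => e.2.1.toList)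
  have hplen : paths.length = entries.length := by rw [hpaths]; simp
  have hgetp : ∀ (j : Nat) (hj : j < entries.length), paths[j]'(by omega) = entries[j].2.1.toList := by
    intro j hj
    have : paths[j]'(by omega) = (entries.map (fun e => e.2.1.toList))[j]'(by simp [hj]) := by
      congr 1
    rw [this, List.getElem_map]
  obtain ⟨hlo_len, hlo_below, hlo_above⟩ :
      lo ≤ paths.length ∧
      (∀ (j : Nat) (hj : j < paths.length), j < lo → paths[j] < t.toList) ∧
      (∀ (j : Nat) (hj : j < paths.length), lo ≤ j → t.toList ≤ paths[j]) := by
    rw [hlo, pv_bisect_instLT]; exact pv_bisect_spec paths t.toList hpw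
  obtain ⟨hhi_len, hhi_below, hhi_above⟩ :
      hi ≤ paths.length ∧
      (∀ (j : Nat) (hj : j < paths.length), j < hi → paths[j] < t.toList ++ [pvM]) ∧
      (∀ (j : Nat) (hj : j < paths.length), hi ≤ j → t.toList ++ [pvM] ≤ paths[j]) := by
    rw [hhi, pv_bisect_instLT]; exact pv_bisect_spec paths (t.toList ++ [pvM]) hpw
  have hchar' : ∀ (j : Nat) (hj : j < entries.length), ∀ c ∈ entries[j].2.1.toList, c < pvM := by
    intro j hj c hc
    have hmem : entries[j] ∈ PySem.List.enumerate items 0 := hperm.subset (List.getElem_mem hj)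
    obtain ⟨k, hk, he⟩ := (PySem.List.mem_enumerate_iff _ _ _).mp hmem
    exact hchars entries[j].2 (by rw [he]; exact List.getElem_mem hk) c hc
  have hlohi : lo ≤ hi := by
    by_contra hlt
    push_neg at hlt
    have hhi_lt : hi < paths.length := by omega
    have h1 := hlo_below hi hhi_lt hlt
    have h2 := hhi_above hi hhi_lt (le_refl hi)
    exact absurd (lt_of_le_of_lt (le_trans (le_of_lt (pv_lt_snoc t.toList pvM)) h2) h1)
      (lt_irrefl _)
  have hwind : ∀ (j : Nat) (hj : j < entries.length),
      ((fun e => PySem.Str.startswith e.2.1 t) entries[j] = true ↔ (lo ≤ j ∧ j < hi)) := by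
    intro j hj
    have hj' : j < paths.length := by omega
    simp only []
    rw [PySem.Str.startswith_eq, PySem.Chars.startswith_iff,
        ← pv_prefix_range t.toList entries[j].2.1.toList (hchar' j hj), ← hgetp j hj]
    constructor
    · rintro ⟨h1, h2⟩
      constructor
      · by_contra hc; push_neg at hc
        exact absurd (lt_of_le_of_lt h1 (hlo_below j hj' hc)) (lt_irrefl _)
      · by_contra hc; push_neg at hc
        exact absurd (lt_of_lt_of_le h2 (hhi_above j hj' hc)) (lt_irrefl _)
    · rintro ⟨h1, h2⟩
      exact ⟨hlo_above j hj' h1, hhi_below j hj' h2⟩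
  have hfilter : entries.filter (fun e => PySem.Str.startswith e.2.1 t)
      = (entries.drop lo).take (hi - lo) :=
    pv_filter_eq_window entries _ lo hi hlohi (by omega) hwind
  rw [PySem.List.slice_natCast]
  refine PySem.List.sorted_eq_of_perm_of_pairwise_lt _ _ _ ?_ ?_
  · exact hfilter ▸ (hperm.symm.filter _)
  · exact List.Pairwise.sublist List.filter_sublist (PySem.List.pairwise_lt_enumerate items 0)

-- ===== VERDICT (by name: the statement is the Claim_ definition above) =====
theorem expand_alias_sources_spec : Claim_equal_expand_alias_sources := by
  intro sources remaps hdom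
  show expand_alias_sources sources remaps = expand_alias_sources_alt sources remaps
  have hchars : ∀ pc ∈ (PySem.Dict.ofList sources).items, ∀ c ∈ pc.1.toList, c < pvM := by
    intro pc hpc c hc
    obtain ⟨y, hy, hy1⟩ := List.mem_map.mp (pv_key_mem sources pc hpc)
    unfold Dom_expand_alias_sources at hdom
    simp only [Bool.and_eq_true, List.all_eq_true] at hdom
    have hstr : pvDomStr y.1 = true := (hdom.1 y hy).1
    simp only [pvDomStr, List.all_eq_true] at hstr
    exact pv_char_lt c (hstr c (by rw [hy1]; exact hc))
  simp only [expand_alias_sources, expand_alias_sources_alt]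
  congr 1
  congr 1
  funext exp at_
  rw [pv_window ((PySem.Dict.ofList sources).items) at_.2 hchars _ rfl _ rfl _ _ rfl rfl]
  conv_lhs => rw [PySem.List.foldl_if_eq_foldl_filter]
  rw [← pv_enum_filter_map ((PySem.Dict.ofList sources).items) 0
        (fun pc => PySem.Str.startswith pc.1 at_.2), List.foldl_map]
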